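-- pv_equiv track=rewrite | github.com/brianstm/NUS | CS1010E/PE1/Practice/19-20 Sem 2/Question2.py | make_bouquet
-- ===== SOURCE A (Python) =====
-- def make_bouquet(shop, number):
--     for i in range(len(shop)):
--         for j in range(i, len(shop)):
--             for k in range(j, len(shop)):
--                 if (shop[i][1] + shop[j][1] + shop[k][1] == number and
--                         (shop[i][0] == 'P' or shop[j][0] == 'P' or shop[k][0] == 'P')):
--                     return True
--     return False
-- ===== SOURCE B (Python) =====
-- def make_bouquet(shop, number):
--     prices = [price for _, price in shop]
--     price_set = set(prices)
--     p_prices = {price for name, price in shop if name == 'P'}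
--     for p in p_prices:
--         rest = number - p
--         for q in prices:
--             if rest - q in price_set:
--                 return True
--     return False
-- ===== Notes on version B (the rewrite author's own statement) =====
-- stated objective: faster
-- what changed: A's cubic scan over all index triples i<=j<=k is replaced by a quadratic pass: for each distinct price of a 'P' flower and each shop price, look up the complement price in a precomputed set.
import Mathlib
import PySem

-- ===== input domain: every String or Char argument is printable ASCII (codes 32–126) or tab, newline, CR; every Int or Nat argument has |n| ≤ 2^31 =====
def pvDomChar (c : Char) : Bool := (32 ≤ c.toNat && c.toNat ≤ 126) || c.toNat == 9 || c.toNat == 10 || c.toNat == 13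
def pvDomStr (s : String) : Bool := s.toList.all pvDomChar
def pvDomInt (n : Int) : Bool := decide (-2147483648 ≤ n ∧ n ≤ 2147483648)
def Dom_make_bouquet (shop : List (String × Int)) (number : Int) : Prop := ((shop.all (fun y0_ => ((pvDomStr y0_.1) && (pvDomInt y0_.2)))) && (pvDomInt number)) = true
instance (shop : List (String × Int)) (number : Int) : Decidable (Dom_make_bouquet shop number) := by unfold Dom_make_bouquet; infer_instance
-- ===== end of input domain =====

-- B replaces A's triple-index scan by a pair scan with a set lookup of the complement price (objective: faster).

-- ===== PORT A =====
-- indices drawn from the ranges are always in bounds, so pyGetD with a dummy default is exact here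
def make_bouquet (shop : List (String × Int)) (number : Int) : Bool :=
  (PySem.List.pyRange 0 shop.length 1).any fun i =>
    (PySem.List.pyRange i shop.length 1).any fun j =>
      (PySem.List.pyRange j shop.length 1).any fun k =>
        let fi := PySem.List.pyGetD shop i ("", 0)
        let fj := PySem.List.pyGetD shop j ("", 0)
        let fk := PySem.List.pyGetD shop k ("", 0)
        decide (fi.2 + fj.2 + fk.2 = number) && (fi.1 == "P" || fj.1 == "P" || fk.1 == "P")

-- ===== PORT B =====
def make_bouquet_alt (shop : List (String × Int)) (number : Int) : Bool :=
  let prices := shop.map (·.2)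
  let priceSet : PySem.Set Int := PySem.Set.ofList prices
  let pPrices : PySem.Set Int := PySem.Set.ofList ((shop.filter (fun f => f.1 == "P")).map (·.2))
  pPrices.any fun p =>
    prices.any fun q => PySem.Set.contains priceSet (number - p - q)

-- ===== PRECONDITION & SPEC =====
def Spec_make_bouquet (shop : List (String × Int)) (number : Int) (out : Bool) : Prop := out = make_bouquet_alt shop number
instance (shop : List (String × Int)) (number : Int) (out : Bool) : Decidable (Spec_make_bouquet shop number out) := by unfold Spec_make_bouquet; infer_instance

-- ===== CLAIM (what is proved, stated in full; the proofs are below) =====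
def Claim_equal_make_bouquet : Prop := ∀ (shop : List (String × Int)) (number : Int), Dom_make_bouquet shop number → Spec_make_bouquet shop number (make_bouquet shop number)

-- ===== LEMMAS AND PROOFS =====

-- the common characterisation: some multiset of three flowers (repetition allowed) sums to `number` and contains a 'P'
def pvTri (shop : List (String × Int)) (number : Int) : Prop :=
  ∃ x ∈ shop, ∃ y ∈ shop, ∃ z ∈ shop,
    x.2 + y.2 + z.2 = number ∧ (x.1 = "P" ∨ y.1 = "P" ∨ z.1 = "P")

-- any witnessing triple of elements can be re-indexed in nondecreasing index order (the shape A's loops visit)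
theorem pvTri_of_elems (shop : List (String × Int)) (number : Int)
    (x y z : String × Int) (hx : x ∈ shop) (hy : y ∈ shop) (hz : z ∈ shop)
    (hsum : x.2 + y.2 + z.2 = number) (hP : x.1 = "P" ∨ y.1 = "P" ∨ z.1 = "P") :
    ∃ a b c : Nat, a ≤ b ∧ b ≤ c ∧ ∃ (ha : a < shop.length) (hb : b < shop.length) (hc : c < shop.length),
      shop[a].2 + shop[b].2 + shop[c].2 = number ∧
      (shop[a].1 = "P" ∨ shop[b].1 = "P" ∨ shop[c].1 = "P") := by
  obtain ⟨a, ha, rfl⟩ := List.mem_iff_getElem.1 hx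
  obtain ⟨b, hb, rfl⟩ := List.mem_iff_getElem.1 hy
  obtain ⟨c, hc, rfl⟩ := List.mem_iff_getElem.1 hz
  rcases le_total a b with h1 | h1 <;> rcases le_total b c with h2 | h2 <;> rcases le_total a c with h3 | h3
  · exact ⟨a, b, c, h1, h2, ha, hb, hc, by omega, by tauto⟩
  · exact ⟨a, b, c, h1, h2, ha, hb, hc, by omega, by tauto⟩
  · exact ⟨a, c, b, h3, h2, ha, hc, hb, by omega, by tauto⟩
  · exact ⟨c, a, b, h3, h1, hc, ha, hb, by omega, by tauto⟩
  · exact ⟨b, a, c, h1, h3, hb, ha, hc, by omega, by tauto⟩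
  · exact ⟨b, c, a, h2, h3, hb, hc, ha, by omega, by tauto⟩
  · exact ⟨c, b, a, h2, h1, hc, hb, ha, by omega, by tauto⟩
  · exact ⟨c, b, a, h2, h1, hc, hb, ha, by omega, by tauto⟩

theorem make_bouquet_eq_true_iff (shop : List (String × Int)) (number : Int) :
    make_bouquet shop number = true ↔ pvTri shop number := by
  simp only [make_bouquet, List.any_eq_true, PySem.List.mem_pyRange_one,
    Bool.and_eq_true, Bool.or_eq_true, decide_eq_true_eq, beq_iff_eq]
  constructor
  · rintro ⟨i, ⟨hi0, hin⟩, j, ⟨hij, hjn⟩, k, ⟨hjk, hkn⟩, hcond⟩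
    rw [PySem.List.pyGetD_eq_getElem shop ("", 0) hi0 hin,
        PySem.List.pyGetD_eq_getElem shop ("", 0) (by omega) hjn,
        PySem.List.pyGetD_eq_getElem shop ("", 0) (by omega) hkn] at hcond
    exact ⟨_, List.getElem_mem _, _, List.getElem_mem _, _, List.getElem_mem _, hcond.1, by tauto⟩
  · rintro ⟨x, hx, y, hy, z, hz, hsum, hP⟩
    obtain ⟨a, b, c, hab, hbc, ha, hb, hc, hs, hp⟩ := pvTri_of_elems shop number x y z hx hy hz hsum hP
    refine ⟨a, ⟨by omega, by exact_mod_cast ha⟩, b, ⟨by exact_mod_cast hab, by exact_mod_cast hb⟩,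
      c, ⟨by exact_mod_cast hbc, by exact_mod_cast hc⟩, ?_⟩
    rw [PySem.List.pyGetD_eq_getElem shop ("", 0) (by omega) (by exact_mod_cast ha),
        PySem.List.pyGetD_eq_getElem shop ("", 0) (by omega) (by exact_mod_cast hb),
        PySem.List.pyGetD_eq_getElem shop ("", 0) (by omega) (by exact_mod_cast hc)]
    simpa using ⟨hs, by tauto⟩

theorem make_bouquet_alt_eq_true_iff (shop : List (String × Int)) (number : Int) :
    make_bouquet_alt shop number = true ↔ pvTri shop number := by
  simp only [make_bouquet_alt, List.any_eq_true, PySem.Set.mem_ofList,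
    PySem.Set.contains_iff, List.mem_map, List.mem_filter, beq_iff_eq, pvTri]
  constructor
  · rintro ⟨p, ⟨x, ⟨hx, hxP⟩, rfl⟩, q, ⟨y, hy, rfl⟩, z, hz, hzq⟩
    exact ⟨x, hx, y, hy, z, hz, by omega, Or.inl hxP⟩
  · rintro ⟨x, hx, y, hy, z, hz, hsum, hP⟩
    rcases hP with h | h | h
    · exact ⟨x.2, ⟨x, ⟨hx, h⟩, rfl⟩, y.2, ⟨y, hy, rfl⟩, z, hz, by omega⟩
    · exact ⟨y.2, ⟨y, ⟨hy, h⟩, rfl⟩, x.2, ⟨x, hx, rfl⟩, z, hz, by omega⟩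
    · exact ⟨z.2, ⟨z, ⟨hz, h⟩, rfl⟩, x.2, ⟨x, hx, rfl⟩, y, hy, by omega⟩

-- ===== VERDICT (by name: the statement is the Claim_ definition above) =====
theorem make_bouquet_spec : Claim_equal_make_bouquet := by
  intro shop number _
  unfold Spec_make_bouquet
  rw [Bool.eq_iff_iff, make_bouquet_eq_true_iff, make_bouquet_alt_eq_true_iff]
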